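-- pv_equiv track=rewrite | github.com/Negro-13/Repasoprog | Eva 1/Ej 3.py | count
-- ===== SOURCE A (Python) =====
-- def count (matrix):
--     result = []
--     for x in range(len(matrix)):
--         for y in range(len(matrix[x])):
--             num = x + y
--             if num % 2 == 1:
--                 result.append(matrix[x][y])
--     return result
-- ===== SOURCE B (Python) =====
-- def count(matrix):
--     result = []
--     for x, row in enumerate(matrix):
--         result.extend(row[(x + 1) % 2::2])
--     return result
-- ===== Notes on version B (the rewrite author's own statement) =====
-- stated objective: simpler
-- what changed: Replaces the index-based double loop with a per-cell parity test by a single pass over enumerate(matrix) that extends the result with the strided slice row[(x+1)%2::2], which selects exactly the x+y-odd cells of each row with no inner loop and no branch.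
import Mathlib
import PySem

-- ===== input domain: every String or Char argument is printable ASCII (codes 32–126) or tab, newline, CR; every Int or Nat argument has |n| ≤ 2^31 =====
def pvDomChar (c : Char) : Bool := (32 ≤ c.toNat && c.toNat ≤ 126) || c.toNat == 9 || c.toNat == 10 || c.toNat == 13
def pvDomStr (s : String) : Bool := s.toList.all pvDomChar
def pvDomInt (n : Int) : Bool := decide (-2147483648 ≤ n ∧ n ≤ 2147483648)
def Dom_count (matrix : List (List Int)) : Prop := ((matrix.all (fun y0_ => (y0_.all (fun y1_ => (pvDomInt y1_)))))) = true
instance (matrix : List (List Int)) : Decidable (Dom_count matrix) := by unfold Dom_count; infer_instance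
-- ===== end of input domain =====

-- B replaces the per-cell parity-tested double loop by one strided slice per row (simpler).

-- ===== PORT A =====
def count (matrix : List (List Int)) : List Int :=
  (PySem.List.pyRange 0 (matrix.length : Int) 1).foldl (fun result x =>
    (PySem.List.pyRange 0 ((PySem.List.pyGetD matrix x []).length : Int) 1).foldl (fun result y =>
      let num := x + y
      if PySem.Int.mod num 2 = 1 then
        result ++ [PySem.List.pyGetD (PySem.List.pyGetD matrix x []) y 0]
      else result) result) []

-- ===== PORT B =====
def count_alt (matrix : List (List Int)) : List Int :=
  (PySem.List.enumerate matrix 0).foldl (fun result p =>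
    result ++ (PySem.List.slice? p.2 (some (PySem.Int.mod (p.1 + 1) 2)) none 2).getD []) []

-- ===== PRECONDITION & SPEC =====
def Spec_count (matrix : List (List Int)) (out : List Int) : Prop := out = count_alt matrix
instance (matrix : List (List Int)) (out : List Int) : Decidable (Spec_count matrix out) := by unfold Spec_count; infer_instance

-- ===== CLAIM (what is proved, stated in full; the proofs are below) =====
def Claim_equal_count : Prop := ∀ (matrix : List (List Int)), Dom_count matrix → Spec_count matrix (count matrix)

-- ===== LEMMAS AND PROOFS =====

-- every other element, starting with the first
def eo {α : Type} : List α → List α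
  | [] => []
  | [a] => [a]
  | a :: _ :: t => a :: eo t

theorem eo_cons {α : Type} (a : α) (t : List α) : eo (a :: t) = a :: eo t.tail := by
  cases t <;> simp [eo]

-- core of the strided slice: successive even indices
theorem filterMap_even (l : List Int) :
    List.filterMap (fun k => l[2 * k]?) (List.range ((l.length + 1) / 2)) = eo l := by
  induction l using eo.induct with
  | case1 => simp [eo]
  | case2 a => simp [eo]
  | case3 a b t ih =>
    have h : ((a :: b :: t).length + 1) / 2 = (t.length + 1) / 2 + 1 := by
      simp; omega
    rw [h, List.range_succ_eq_map, List.filterMap_cons, List.filterMap_map]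
    simp only [Nat.mul_zero, List.getElem?_cons_zero]
    have : (fun k => (a :: b :: t)[2 * Nat.succ k]?) = fun k => t[2 * k]? := by
      funext k
      have : 2 * Nat.succ k = 2 * k + 1 + 1 := by omega
      rw [this]
      simp
    rw [Function.comp_def]
    simp only [this]
    rw [ih, eo]

theorem slice0 (l : List Int) :
    PySem.List.slice? l (some 0) none 2 = some (eo l) := by
  rw [PySem.List.slice?, PySem.List.sliceIndices]
  simp only [if_neg (by norm_num : ¬ (2:Int) = 0)]
  norm_num
  rw [← filterMap_even l]
  have hc : (if 0 < l.length then (((l.length:Int) + 2 - 1) / 2).toNat else 0)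
      = (l.length + 1) / 2 := by split <;> omega
  rw [hc]
  have hf : (fun x : Nat => l[(2 * (x:Int)).toNat]?) = (fun k : Nat => l[2 * k]?) := by
    funext k
    have : (2 * (k:Int)).toNat = 2 * k := by omega
    rw [this]
  rw [hf]

theorem slice1 (l : List Int) :
    PySem.List.slice? l (some 1) none 2 = some (eo l.tail) := by
  rcases l with _ | ⟨a, t⟩
  · rfl
  · rw [PySem.List.slice?, PySem.List.sliceIndices]
    simp only [if_neg (by norm_num : ¬ (2:Int) = 0)]
    norm_num
    rw [← filterMap_even t]
    have hc : (if 0 < t.length then (((t.length:Int) + 2 - 1) / 2).toNat else 0)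
        = (t.length + 1) / 2 := by split <;> omega
    rw [hc]
    have hf : (fun x : Nat => (a :: t)[(1 + 2 * (x:Int)).toNat]?) = (fun k : Nat => t[2 * k]?) := by
      funext k
      have hk : (1 + 2 * (k:Int)).toNat = 2 * k + 1 := by omega
      rw [hk]; simp
    rw [hf]

-- parity helper: Python's % on nonnegative ints
theorem mod2 (x : Int) : PySem.Int.mod x 2 = x % 2 := by
  simp [PySem.Int.mod, Int.fmod_eq_emod]

-- A's inner loop over a row, in List.range form
theorem innerA (l : List Int) (x : Int) (r : List Int) :
    (List.range l.length).foldl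
      (fun r (k : Nat) =>
        if PySem.Int.mod (x + (k : Int)) 2 = 1 then r ++ [PySem.List.pyGetD l (k : Int) 0] else r) r
      = r ++ (if PySem.Int.mod x 2 = 1 then eo l else eo l.tail) := by
  induction l generalizing x r with
  | nil => simp [eo]
  | cons a t ih =>
    rw [List.length_cons, List.range_succ_eq_map, List.foldl_cons, List.foldl_map]
    have hstep : (fun (r : List Int) (k : Nat) =>
        if PySem.Int.mod (x + (Nat.succ k : Int)) 2 = 1 then
          r ++ [PySem.List.pyGetD (a :: t) (Nat.succ k : Int) 0] else r)
        = (fun (r : List Int) (k : Nat) =>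
        if PySem.Int.mod ((x + 1) + (k : Int)) 2 = 1 then
          r ++ [PySem.List.pyGetD t (k : Int) 0] else r) := by
      funext r k
      have h1 : x + (Nat.succ k : Int) = (x + 1) + (k : Int) := by push_cast; ring
      have h2 : PySem.List.pyGetD (a :: t) (Nat.succ k : Int) 0 = PySem.List.pyGetD t (k : Int) 0 := by
        rw [PySem.List.pyGetD_of_nonneg _ _ (by positivity),
            PySem.List.pyGetD_of_nonneg _ _ (Int.natCast_nonneg k)]
        have : ((Nat.succ k : Int)).toNat = k + 1 := by omega
        rw [this]
        simp
      rw [h1, h2]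
    rw [hstep, ih (x + 1)]
    have ha : PySem.List.pyGetD (a :: t) ((0 : Nat) : Int) 0 = a := by
      rw [PySem.List.pyGetD_of_nonneg _ _ (by norm_num)]
      simp
    rw [mod2, mod2, mod2] at *
    by_cases hx : x% 2 = 1
    · have hx1 : (x + 1)% 2 ≠ 1 := by omega
      rw [if_pos (by push_cast; omega : (x + ((0:Nat):Int))% 2 = 1), if_neg hx1, if_pos hx, ha,
          eo_cons, List.append_assoc]
      simp
    · have hx0 : x% 2 = 0 := by omega
      have hx1 : (x + 1)% 2 = 1 := by omega
      rw [if_neg (by push_cast; omega : ¬ (x + ((0:Nat):Int))% 2 = 1), if_pos hx1, if_neg hx]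
      simp

theorem count_spec' : ∀ (matrix : List (List Int)), count matrix = count_alt matrix := by
  intro matrix
  unfold count count_alt
  rw [PySem.List.enumerate_eq_map_pyRange matrix [], List.foldl_map]
  simp only [PySem.List.len_eq]
  apply PySem.List.foldl_congr_mem
  intro acc x hx
  have hx0 : 0 ≤ x := ((PySem.List.mem_pyRange_one).mp hx).1
  set row := PySem.List.pyGetD matrix x [] with hrow
  -- reduce A's inner loop to List.range form and apply innerA
  rw [PySem.List.pyRange_one 0 (row.length : Int)]
  have hr : ((row.length : Int) - 0).toNat = row.length := by omega
  rw [hr, List.foldl_map]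
  have hstep : (fun (r : List Int) (k : Nat) =>
      if PySem.Int.mod (x + (0 + (k : Int))) 2 = 1 then
        r ++ [PySem.List.pyGetD row (0 + (k : Int)) 0] else r)
      = (fun (r : List Int) (k : Nat) =>
      if PySem.Int.mod (x + (k : Int)) 2 = 1 then
        r ++ [PySem.List.pyGetD row (k : Int) 0] else r) := by
    funext r k; rw [zero_add]
  rw [hstep, innerA row x acc]
  rw [mod2, mod2]
  rcases Int.emod_two_eq_zero_or_one x with h0 | h1
  · have : (x + 1)% 2 = 1 := by omega
    rw [this, slice1, if_neg (by omega)]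
    rfl
  · have : (x + 1)% 2 = 0 := by omega
    rw [this, slice0, if_pos h1]
    rfl

-- ===== VERDICT (by name: the statement is the Claim_ definition above) =====
theorem count_spec : Claim_equal_count := by
  intro m _
  unfold Spec_count
  exact count_spec' m
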